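-- pv_equiv track=rewrite | github.com/lanalikescode/Domler | domler.py | compound_bonus
-- ===== SOURCE A (Python) =====
-- COMPOUND_MINI_WORDS = {
--     "roof",
--     "shop",
--     "clean",
--     "data",
--     "cloud",
--     "lab",
--     "labs",
--     "bank",
--     "pay",
--     "cash",
--     "box",
--     "desk",
--     "care",
--     "home",
--     "tech",
--     "bio",
--     "med",
--     "card",
--     "mark",
--     "ship",
--     "pack",
--     "wave",
--     "light",
--     "safe",
--     "guard",
--     "leaf",
--     "stone",
-- }
--
-- def compound_bonus(sld: str) -> int:
--     length = len(sld)
--     for split in range(3, length - 2):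
--         left = sld[:split]
--         right = sld[split:]
--         if left in COMPOUND_MINI_WORDS and right in COMPOUND_MINI_WORDS:
--             return 2
--     return 0
-- ===== SOURCE B (Python) =====
-- COMPOUND_MINI_WORDS = {
--     "roof", "shop", "clean", "data", "cloud", "lab", "labs", "bank", "pay",
--     "cash", "box", "desk", "care", "home", "tech", "bio", "med", "card",
--     "mark", "ship", "pack", "wave", "light", "safe", "guard", "leaf", "stone",
-- }
--
-- def compound_bonus(sld: str) -> int:
--     # Enumerate candidate prefix words instead of split positions: every word
--     # has length >= 3, so the prefix/suffix length constraints of the original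
--     # position scan are satisfied automatically.
--     for word in COMPOUND_MINI_WORDS:
--         if sld.startswith(word) and sld[len(word):] in COMPOUND_MINI_WORDS:
--             return 2
--     return 0
-- ===== Notes on version B (the rewrite author's own statement) =====
-- stated objective: faster
-- what changed: B enumerates the 27-word set, testing each word as a prefix and looking up the remaining suffix, instead of scanning every split position of the string and slicing twice per position.
import Mathlib
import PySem

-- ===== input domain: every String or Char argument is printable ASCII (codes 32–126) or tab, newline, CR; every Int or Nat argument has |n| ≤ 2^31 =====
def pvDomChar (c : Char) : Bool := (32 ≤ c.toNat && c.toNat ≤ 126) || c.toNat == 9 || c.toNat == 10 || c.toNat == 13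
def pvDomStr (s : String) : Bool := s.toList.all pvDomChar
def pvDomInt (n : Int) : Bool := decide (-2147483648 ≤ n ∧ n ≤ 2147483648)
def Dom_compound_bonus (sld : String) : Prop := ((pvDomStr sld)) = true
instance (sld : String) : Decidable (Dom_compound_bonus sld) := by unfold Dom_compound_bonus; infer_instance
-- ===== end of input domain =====

-- B enumerates the word set (prefix word + suffix lookup) instead of scanning split positions; idiomatic, same behaviour.

-- ===== PORT A =====
def compound_words : PySem.Set String :=
  PySem.Set.ofList ["roof", "shop", "clean", "data", "cloud", "lab", "labs", "bank",
    "pay", "cash", "box", "desk", "care", "home", "tech", "bio", "med", "card",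
    "mark", "ship", "pack", "wave", "light", "safe", "guard", "leaf", "stone"]

-- the 'for split in range(...): if …: return 2' loop returns 2 on the first hit, else 0
def compound_bonus (sld : String) : Int :=
  let length : Int := PySem.Str.len sld
  if (PySem.List.pyRange 3 (length - 2) 1).any (fun split =>
      PySem.Set.contains compound_words (PySem.Str.slice sld none (some split)) &&
      PySem.Set.contains compound_words (PySem.Str.slice sld (some split) none))
  then 2 else 0

-- ===== PORT B =====
-- 'for word in COMPOUND_MINI_WORDS: if …: return 2' — result is order-independent (2 on any hit)
def compound_bonus_alt (sld : String) : Int :=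
  if compound_words.any (fun word =>
      PySem.Str.startswith sld word &&
      PySem.Set.contains compound_words (PySem.Str.slice sld (some (PySem.Str.len word)) none))
  then 2 else 0

-- ===== PRECONDITION & SPEC =====
def Spec_compound_bonus (sld : String) (out : Int) : Prop := out = compound_bonus_alt sld
instance (sld : String) (out : Int) : Decidable (Spec_compound_bonus sld out) := by unfold Spec_compound_bonus; infer_instance

-- ===== CLAIM (what is proved, stated in full; the proofs are below) =====
def Claim_equal_compound_bonus : Prop := ∀ (sld : String), Dom_compound_bonus sld → Spec_compound_bonus sld (compound_bonus sld)

-- ===== LEMMAS AND PROOFS =====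

-- every word in the set has length between 3 and 5
lemma words_len : ∀ w ∈ compound_words, 3 ≤ w.toList.length ∧ w.toList.length ≤ 5 := by decide

lemma conds_iff (sld : String) :
    ((PySem.List.pyRange 3 (PySem.Str.len sld - 2) 1).any (fun split =>
      PySem.Set.contains compound_words (PySem.Str.slice sld none (some split)) &&
      PySem.Set.contains compound_words (PySem.Str.slice sld (some split) none)) = true) ↔
    (compound_words.any (fun word =>
      PySem.Str.startswith sld word &&
      PySem.Set.contains compound_words (PySem.Str.slice sld (some (PySem.Str.len word)) none)) = true) := by
  simp only [List.any_eq_true, Bool.and_eq_true, PySem.Set.contains_iff]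
  constructor
  · rintro ⟨split, hmem, hl, hr⟩
    rw [PySem.List.mem_pyRange_one] at hmem
    obtain ⟨h3, hlt⟩ := hmem
    rw [PySem.Str.len_eq] at hlt
    refine ⟨PySem.Str.slice sld none (some split), hl, ?_, ?_⟩
    · rw [PySem.Str.startswith_eq, PySem.Chars.startswith_iff, PySem.Str.toList_slice,
        PySem.Chars.slice_eq_listSlice, PySem.List.slice_to _ (by omega)]
      exact List.take_prefix _ _
    · have hlen : PySem.Str.len (PySem.Str.slice sld none (some split)) = split := by
        rw [PySem.Str.len_eq, PySem.Str.toList_slice, PySem.Chars.slice_eq_listSlice,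
          PySem.List.slice_to _ (by omega), List.length_take]
        omega
      rw [hlen]; exact hr
  · rintro ⟨w, hw, hpre, hsuf⟩
    rw [PySem.Str.startswith_eq, PySem.Chars.startswith_iff] at hpre
    have hwlen := words_len w hw
    have hslen := words_len _ hsuf
    rw [PySem.Str.toList_slice, PySem.Chars.slice_eq_listSlice, PySem.Str.len_eq,
      PySem.List.slice_from _ (by omega), List.length_drop, Int.toNat_natCast] at hslen
    have hwle : w.toList.length ≤ sld.toList.length := hpre.length_le
    refine ⟨PySem.Str.len w, ?_, ?_, hsuf⟩
    · rw [PySem.List.mem_pyRange_one, PySem.Str.len_eq, PySem.Str.len_eq]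
      omega
    · have : PySem.Str.slice sld none (some (PySem.Str.len w)) = w := by
        apply String.toList_inj.mp
        rw [PySem.Str.toList_slice, PySem.Chars.slice_eq_listSlice, PySem.Str.len_eq,
          PySem.List.slice_to _ (by omega), Int.toNat_natCast]
        exact (List.prefix_iff_eq_take.mp hpre).symm
      rw [this]; exact hw

-- ===== VERDICT (by name: the statement is the Claim_ definition above) =====
theorem compound_bonus_spec : Claim_equal_compound_bonus := by
  intro sld _
  unfold Spec_compound_bonus compound_bonus compound_bonus_alt
  have hb : ((PySem.List.pyRange 3 (PySem.Str.len sld - 2) 1).any (fun split =>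
      PySem.Set.contains compound_words (PySem.Str.slice sld none (some split)) &&
      PySem.Set.contains compound_words (PySem.Str.slice sld (some split) none)))
    = (compound_words.any (fun word =>
      PySem.Str.startswith sld word &&
      PySem.Set.contains compound_words (PySem.Str.slice sld (some (PySem.Str.len word)) none))) := by
    rw [Bool.eq_iff_iff]; exact_mod_cast conds_iff sld
  simp only [hb]
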